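-- pv_equiv track=rewrite | github.com/macqster/yam | visualizer/src/layout.py | _boundary_cells
-- ===== SOURCE A (Python) =====
-- def _boundary_cells(points: set[tuple[int, int]]) -> set[tuple[int, int]]:
--     if not points:
--         return set()
--     boundary: set[tuple[int, int]] = set()
--     for x, y in points:
--         if (
--             (x - 1, y) not in points
--             or (x + 1, y) not in points
--             or (x, y - 1) not in points
--             or (x, y + 1) not in points
--         ):
--             boundary.add((x, y))
--     return boundary
-- ===== SOURCE B (Python) =====
-- def _boundary_cells(points: set[tuple[int, int]]) -> set[tuple[int, int]]:
--     xm = {(x - 1, y) for x, y in points}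
--     xp = {(x + 1, y) for x, y in points}
--     ym = {(x, y - 1) for x, y in points}
--     yp = {(x, y + 1) for x, y in points}
--     interior = points & xm & xp & ym & yp
--     return points - interior
-- ===== Notes on version B (the rewrite author's own statement) =====
-- stated objective: alternative
-- what changed: Replaces the per-point loop with four neighbor membership tests by whole-set algebra: intersect the point set with its four shifted copies to get the interior, then return points minus interior.
import Mathlib
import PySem

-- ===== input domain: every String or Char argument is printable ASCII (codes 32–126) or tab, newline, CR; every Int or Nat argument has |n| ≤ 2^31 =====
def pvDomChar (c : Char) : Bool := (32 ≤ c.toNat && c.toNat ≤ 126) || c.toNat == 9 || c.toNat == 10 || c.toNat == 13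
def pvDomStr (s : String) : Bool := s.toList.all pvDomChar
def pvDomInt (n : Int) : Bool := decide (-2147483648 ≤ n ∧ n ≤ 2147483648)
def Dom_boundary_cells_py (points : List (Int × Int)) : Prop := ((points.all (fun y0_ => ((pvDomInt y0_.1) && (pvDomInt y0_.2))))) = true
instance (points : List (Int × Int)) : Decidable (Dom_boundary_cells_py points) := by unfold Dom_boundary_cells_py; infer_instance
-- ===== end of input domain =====

-- B computes the same boundary set by set algebra (intersection with four shifted copies,
-- then difference) instead of A's per-point loop over neighbor membership tests; objective: alternative.

-- ===== PORT A =====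
def boundary_cells_py (points : List (Int × Int)) : List (Int × Int) :=
  if points = [] then []
  else
    points.foldl (fun boundary p =>
      if !(PySem.Set.contains points (p.1 - 1, p.2))
         || !(PySem.Set.contains points (p.1 + 1, p.2))
         || !(PySem.Set.contains points (p.1, p.2 - 1))
         || !(PySem.Set.contains points (p.1, p.2 + 1))
      then PySem.Set.add boundary p else boundary) []

-- ===== PORT B =====
def boundary_cells_py_alt (points : List (Int × Int)) : List (Int × Int) :=
  let xm := PySem.Set.ofList (points.map (fun p => (p.1 - 1, p.2)))
  let xp := PySem.Set.ofList (points.map (fun p => (p.1 + 1, p.2)))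
  let ym := PySem.Set.ofList (points.map (fun p => (p.1, p.2 - 1)))
  let yp := PySem.Set.ofList (points.map (fun p => (p.1, p.2 + 1)))
  let interior := PySem.Set.inter (PySem.Set.inter (PySem.Set.inter (PySem.Set.inter points xm) xp) ym) yp
  PySem.Set.diff points interior

-- ===== PRECONDITION & SPEC =====
-- The Python parameter is a set, modelled per the type convention as a duplicate-free list.
def Pre_boundary_cells_py (points : List (Int × Int)) : Prop := points.Nodup
instance (points : List (Int × Int)) : Decidable (Pre_boundary_cells_py points) := by unfold Pre_boundary_cells_py; infer_instance
def pvWitness_boundary_cells_py : (List (Int × Int)) := [(0, 0), (1, 0)]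

def Spec_boundary_cells_py (points : List (Int × Int)) (out : List (Int × Int)) : Prop := out = boundary_cells_py_alt points
instance (points : List (Int × Int)) (out : List (Int × Int)) : Decidable (Spec_boundary_cells_py points out) := by unfold Spec_boundary_cells_py; infer_instance

-- ===== CLAIM (what is proved, stated in full; the proofs are below) =====
def Claim_equal_boundary_cells_py : Prop := ∀ (points : List (Int × Int)), Dom_boundary_cells_py points → Pre_boundary_cells_py points → Spec_boundary_cells_py points (boundary_cells_py points)

-- ===== LEMMAS AND PROOFS =====

-- The boundary condition A tests for a point p against the full set pts.
def pvBCond (pts : List (Int × Int)) (p : Int × Int) : Bool :=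
  !(PySem.Set.contains pts (p.1 - 1, p.2))
  || !(PySem.Set.contains pts (p.1 + 1, p.2))
  || !(PySem.Set.contains pts (p.1, p.2 - 1))
  || !(PySem.Set.contains pts (p.1, p.2 + 1))

-- A's fold over a Nodup list lands on filter.
theorem pvFoldl_add_filter (pts : List (Int × Int)) (l : List (Int × Int)) :
    ∀ acc : List (Int × Int), l.Nodup → (∀ p ∈ l, p ∉ acc) →
      l.foldl (fun boundary p => if pvBCond pts p then PySem.Set.add boundary p else boundary) acc
        = acc ++ l.filter (pvBCond pts) := by
  induction l with
  | nil => intro acc _ _; simp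
  | cons p t ih =>
    intro acc hnd hdis
    simp only [List.foldl_cons, List.filter_cons]
    by_cases hc : pvBCond pts p = true
    · simp only [hc, if_true]
      rw [PySem.Set.add_of_not_mem (hdis p (by simp))]
      rw [ih (acc ++ [p]) (List.nodup_cons.mp hnd).2]
      · simp
      · intro q hq
        simp only [List.mem_append, List.mem_singleton]
        rintro (h | rfl)
        · exact hdis q (by simp [hq]) h
        · exact (List.nodup_cons.mp hnd).1 hq
    · rw [if_neg hc, if_neg hc]
      rw [ih acc (List.nodup_cons.mp hnd).2 (fun q hq => hdis q (by simp [hq]))]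

-- Membership in the four shifted copies.
theorem pvMem_xm (pts : List (Int × Int)) (p : Int × Int) :
    p ∈ PySem.Set.ofList (pts.map (fun q => (q.1 - 1, q.2))) ↔ (p.1 + 1, p.2) ∈ pts := by
  rw [PySem.Set.mem_ofList, List.mem_map]
  constructor
  · rintro ⟨q, hq, rfl⟩; simpa using hq
  · intro h; exact ⟨(p.1 + 1, p.2), h, by simp⟩

theorem pvMem_xp (pts : List (Int × Int)) (p : Int × Int) :
    p ∈ PySem.Set.ofList (pts.map (fun q => (q.1 + 1, q.2))) ↔ (p.1 - 1, p.2) ∈ pts := by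
  rw [PySem.Set.mem_ofList, List.mem_map]
  constructor
  · rintro ⟨q, hq, rfl⟩; simpa using hq
  · intro h; exact ⟨(p.1 - 1, p.2), h, by simp⟩

theorem pvMem_ym (pts : List (Int × Int)) (p : Int × Int) :
    p ∈ PySem.Set.ofList (pts.map (fun q => (q.1, q.2 - 1))) ↔ (p.1, p.2 + 1) ∈ pts := by
  rw [PySem.Set.mem_ofList, List.mem_map]
  constructor
  · rintro ⟨q, hq, rfl⟩; simpa using hq
  · intro h; exact ⟨(p.1, p.2 + 1), h, by simp⟩

theorem pvMem_yp (pts : List (Int × Int)) (p : Int × Int) :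
    p ∈ PySem.Set.ofList (pts.map (fun q => (q.1, q.2 + 1))) ↔ (p.1, p.2 - 1) ∈ pts := by
  rw [PySem.Set.mem_ofList, List.mem_map]
  constructor
  · rintro ⟨q, hq, rfl⟩; simpa using hq
  · intro h; exact ⟨(p.1, p.2 - 1), h, by simp⟩

-- B's set difference is A's filter.
theorem pvAlt_eq_filter (pts : List (Int × Int)) :
    boundary_cells_py_alt pts = pts.filter (pvBCond pts) := by
  unfold boundary_cells_py_alt
  have hdiff : ∀ (s t : List (Int × Int)),
      PySem.Set.diff s t = s.filter (fun x => !(PySem.Set.contains t x)) := fun s t => rfl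
  rw [hdiff]
  apply List.filter_congr
  intro p hp
  rw [Bool.eq_iff_iff]
  simp only [pvBCond, Bool.not_eq_eq_eq_not, Bool.not_true, Bool.or_eq_true,
    ← Bool.not_eq_true, PySem.Set.contains_iff,
    PySem.Set.mem_inter, pvMem_xm, pvMem_xp, pvMem_ym, pvMem_yp, hp]
  tauto

-- ===== VERDICT (by name: the statement is the Claim_ definition above) =====
theorem boundary_cells_py_spec : Claim_equal_boundary_cells_py := by
  intro points _ hpre
  unfold Spec_boundary_cells_py boundary_cells_py
  rw [pvAlt_eq_filter]
  by_cases h : points = []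
  · simp [h]
  · rw [if_neg h]
    have := pvFoldl_add_filter points points [] hpre (by simp)
    simpa [pvBCond] using this
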